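-- pv_equiv track=rewrite | github.com/Devrockzz654/YogaPoseFusion | backend/models/recommendations.py | _caution_tags_for_pose
-- ===== SOURCE A (Python) =====
-- def _contains(text: str, *patterns: str) -> bool:
--     return any(pattern in text for pattern in patterns)
--
-- def _caution_tags_for_pose(text: str, families: list[str]):
--     cautions = []
--
--     def add_caution(name: str):
--         if name not in cautions:
--             cautions.append(name)
--
--     if _contains(
--         text,
--         "chair pose",
--         "warrior",
--         "low lunge",
--         "garland pose",
--         "noose pose",
--         "eagle pose",
--         "tree pose",
--         "half moon",
--         "split pose",
--         "virasana",
--         "vajrasana",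
--         "camel pose",
--         "frog pose",
--         "pigeon pose",
--         "bound angle",
--         "child pose",
--     ):
--         add_caution("knee_sensitivity")
--
--     if any(family in families for family in ["arm_balance", "inversion", "shoulder_opener"]) or _contains(
--         text,
--         "plank pose",
--         "cobra pose",
--         "wheel pose",
--         "bow pose",
--         "camel pose",
--     ):
--         add_caution("shoulder_tightness")
--
--     if any(family in families for family in ["backbend", "inversion"]) or _contains(
--         text,
--         "forward bend",
--         "split pose",
--         "plow pose",
--         "shoulderstand",
--     ):
--         add_caution("back_pain")
--
--     if any(family in families for family in ["hip_opener", "standing"]) or _contains(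
--         text,
--         "warrior",
--         "low lunge",
--         "pigeon pose",
--         "frog pose",
--         "split pose",
--     ):
--         add_caution("hip_tightness")
--
--     return cautions
-- ===== SOURCE B (Python) =====
-- # Inverted index: each trigger (family keyword or text substring) maps to the
-- # caution tags it fires; collect fired tags in a set, emit in canonical order.
-- _FAMILY_TAGS = {
--     "arm_balance": ["shoulder_tightness"],
--     "inversion": ["shoulder_tightness", "back_pain"],
--     "shoulder_opener": ["shoulder_tightness"],
--     "backbend": ["back_pain"],
--     "hip_opener": ["hip_tightness"],
--     "standing": ["hip_tightness"],
-- }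
-- _PATTERN_TAGS = {
--     "chair pose": ["knee_sensitivity"],
--     "warrior": ["knee_sensitivity", "hip_tightness"],
--     "low lunge": ["knee_sensitivity", "hip_tightness"],
--     "garland pose": ["knee_sensitivity"],
--     "noose pose": ["knee_sensitivity"],
--     "eagle pose": ["knee_sensitivity"],
--     "tree pose": ["knee_sensitivity"],
--     "half moon": ["knee_sensitivity"],
--     "split pose": ["knee_sensitivity", "back_pain", "hip_tightness"],
--     "virasana": ["knee_sensitivity"],
--     "vajrasana": ["knee_sensitivity"],
--     "camel pose": ["knee_sensitivity", "shoulder_tightness"],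
--     "frog pose": ["knee_sensitivity", "hip_tightness"],
--     "pigeon pose": ["knee_sensitivity", "hip_tightness"],
--     "bound angle": ["knee_sensitivity"],
--     "child pose": ["knee_sensitivity"],
--     "plank pose": ["shoulder_tightness"],
--     "cobra pose": ["shoulder_tightness"],
--     "wheel pose": ["shoulder_tightness"],
--     "bow pose": ["shoulder_tightness"],
--     "forward bend": ["back_pain"],
--     "plow pose": ["back_pain"],
--     "shoulderstand": ["back_pain"],
-- }
-- _TAG_ORDER = ["knee_sensitivity", "shoulder_tightness", "back_pain", "hip_tightness"]
--
-- def _caution_tags_for_pose(text: str, families: list[str]):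
--     fired = set()
--     for family in families:
--         fired.update(_FAMILY_TAGS.get(family, []))
--     for pattern, tags in _PATTERN_TAGS.items():
--         if pattern in text:
--             fired.update(tags)
--     return [tag for tag in _TAG_ORDER if tag in fired]
-- ===== Notes on version B (the rewrite author's own statement) =====
-- stated objective: alternative
-- what changed: Inverts the rule direction: instead of four tag-centric if-branches each scanning families/text, B builds an inverted index from each trigger (family keyword or text substring) to the tags it fires, accumulates fired tags in a set over one pass of families and one pass of the pattern index, and emits tags filtered by a canonical order list.
import Mathlib
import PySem

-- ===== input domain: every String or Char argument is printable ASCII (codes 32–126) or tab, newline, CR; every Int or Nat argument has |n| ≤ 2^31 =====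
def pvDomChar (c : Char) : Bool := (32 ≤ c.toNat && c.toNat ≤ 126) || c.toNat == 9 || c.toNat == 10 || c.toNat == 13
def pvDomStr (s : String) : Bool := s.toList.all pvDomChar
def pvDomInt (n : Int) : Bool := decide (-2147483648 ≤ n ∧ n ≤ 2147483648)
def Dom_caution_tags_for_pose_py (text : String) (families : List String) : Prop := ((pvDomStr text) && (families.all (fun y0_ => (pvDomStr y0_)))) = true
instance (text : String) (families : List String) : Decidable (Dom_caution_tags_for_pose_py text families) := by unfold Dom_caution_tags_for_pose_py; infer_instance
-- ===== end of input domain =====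

-- B inverts A's tag-centric branches into a trigger→tags inverted index, collecting
-- fired tags in a set and emitting them in a canonical order; objective: alternative.

-- ===== PORT A =====
-- _contains(text, *patterns)
def pvContains (text : String) (patterns : List String) : Bool :=
  patterns.any (fun p => PySem.Str.isIn p text)

-- add_caution: append name if not already present
def pvAddCaution (cautions : List String) (name : String) : List String :=
  if cautions.contains name then cautions else cautions ++ [name]

def caution_tags_for_pose_py (text : String) (families : List String) : List String :=
  let cautions : List String := []
  let cautions :=
    if pvContains text ["chair pose", "warrior", "low lunge", "garland pose",
        "noose pose", "eagle pose", "tree pose", "half moon", "split pose",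
        "virasana", "vajrasana", "camel pose", "frog pose", "pigeon pose",
        "bound angle", "child pose"]
    then pvAddCaution cautions "knee_sensitivity" else cautions
  let cautions :=
    if (["arm_balance", "inversion", "shoulder_opener"].any (fun f => families.contains f))
        || pvContains text ["plank pose", "cobra pose", "wheel pose", "bow pose", "camel pose"]
    then pvAddCaution cautions "shoulder_tightness" else cautions
  let cautions :=
    if (["backbend", "inversion"].any (fun f => families.contains f))
        || pvContains text ["forward bend", "split pose", "plow pose", "shoulderstand"]
    then pvAddCaution cautions "back_pain" else cautions
  let cautions :=
    if (["hip_opener", "standing"].any (fun f => families.contains f))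
        || pvContains text ["warrior", "low lunge", "pigeon pose", "frog pose", "split pose"]
    then pvAddCaution cautions "hip_tightness" else cautions
  cautions

-- ===== PORT B =====
-- _FAMILY_TAGS: family keyword → tags it fires
def pvFamilyTags : PySem.Dict String (List String) := PySem.Dict.mk
  [("arm_balance", ["shoulder_tightness"]),
   ("inversion", ["shoulder_tightness", "back_pain"]),
   ("shoulder_opener", ["shoulder_tightness"]),
   ("backbend", ["back_pain"]),
   ("hip_opener", ["hip_tightness"]),
   ("standing", ["hip_tightness"])]

-- _PATTERN_TAGS: text substring → tags it fires
def pvPatternTags : PySem.Dict String (List String) := PySem.Dict.mk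
  [("chair pose", ["knee_sensitivity"]),
   ("warrior", ["knee_sensitivity", "hip_tightness"]),
   ("low lunge", ["knee_sensitivity", "hip_tightness"]),
   ("garland pose", ["knee_sensitivity"]),
   ("noose pose", ["knee_sensitivity"]),
   ("eagle pose", ["knee_sensitivity"]),
   ("tree pose", ["knee_sensitivity"]),
   ("half moon", ["knee_sensitivity"]),
   ("split pose", ["knee_sensitivity", "back_pain", "hip_tightness"]),
   ("virasana", ["knee_sensitivity"]),
   ("vajrasana", ["knee_sensitivity"]),
   ("camel pose", ["knee_sensitivity", "shoulder_tightness"]),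
   ("frog pose", ["knee_sensitivity", "hip_tightness"]),
   ("pigeon pose", ["knee_sensitivity", "hip_tightness"]),
   ("bound angle", ["knee_sensitivity"]),
   ("child pose", ["knee_sensitivity"]),
   ("plank pose", ["shoulder_tightness"]),
   ("cobra pose", ["shoulder_tightness"]),
   ("wheel pose", ["shoulder_tightness"]),
   ("bow pose", ["shoulder_tightness"]),
   ("forward bend", ["back_pain"]),
   ("plow pose", ["back_pain"]),
   ("shoulderstand", ["back_pain"])]

def pvTagOrder : List String :=
  ["knee_sensitivity", "shoulder_tightness", "back_pain", "hip_tightness"]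

def caution_tags_for_pose_py_alt (text : String) (families : List String) : List String :=
  let fired : PySem.Set String :=
    families.foldl (fun s family => PySem.Set.update s (PySem.Dict.getD pvFamilyTags family [])) PySem.Set.empty
  let fired : PySem.Set String :=
    (PySem.Dict.items pvPatternTags).foldl
      (fun s pr => if PySem.Str.isIn pr.1 text then PySem.Set.update s pr.2 else s) fired
  pvTagOrder.filter (fun tag => PySem.Set.contains fired tag)

-- ===== PRECONDITION & SPEC =====
def Spec_caution_tags_for_pose_py (text : String) (families : List String) (out : List String) : Prop := out = caution_tags_for_pose_py_alt text families
instance (text : String) (families : List String) (out : List String) : Decidable (Spec_caution_tags_for_pose_py text families out) := by unfold Spec_caution_tags_for_pose_py; infer_instance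

-- ===== CLAIM (what is proved, stated in full; the proofs are below) =====
def Claim_equal_caution_tags_for_pose_py : Prop := ∀ (text : String) (families : List String), Dom_caution_tags_for_pose_py text families → Spec_caution_tags_for_pose_py text families (caution_tags_for_pose_py text families)

-- ===== LEMMAS AND PROOFS =====

-- the fired-tags set B builds (proof-only name for the two folds in the port)
def pvFired (text : String) (families : List String) : PySem.Set String :=
  (PySem.Dict.items pvPatternTags).foldl
    (fun s pr => if PySem.Str.isIn pr.1 text then PySem.Set.update s pr.2 else s)
    (families.foldl (fun s family => PySem.Set.update s (PySem.Dict.getD pvFamilyTags family [])) PySem.Set.empty)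

theorem alt_eq (text : String) (families : List String) :
    caution_tags_for_pose_py_alt text families
      = pvTagOrder.filter (fun tag => PySem.Set.contains (pvFired text families) tag) := rfl

-- membership in the family-pass fold
theorem mem_foldl_update {α : Type} (f : α → List String) (l : List α) (s : PySem.Set String) (t : String) :
    t ∈ l.foldl (fun s x => PySem.Set.update s (f x)) s ↔ t ∈ s ∨ ∃ x ∈ l, t ∈ f x := by
  induction l generalizing s with
  | nil => simp
  | cons a l ih =>
    simp only [List.foldl, ih, PySem.Set.mem_update, List.mem_cons, exists_eq_or_imp]
    tauto

-- membership in the pattern-pass fold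
theorem mem_foldl_if_update (c : String × List String → Bool) (l : List (String × List String))
    (s : PySem.Set String) (t : String) :
    t ∈ l.foldl (fun s pr => if c pr then PySem.Set.update s pr.2 else s) s ↔
      t ∈ s ∨ ∃ pr ∈ l, c pr = true ∧ t ∈ pr.2 := by
  induction l generalizing s with
  | nil => simp
  | cons a l ih =>
    by_cases h : c a = true
    · simp only [List.foldl, h, if_true, ih, PySem.Set.mem_update, List.mem_cons,
        exists_eq_or_imp]
      tauto
    · simp only [List.foldl, h, if_false, Bool.false_eq_true, ih, List.mem_cons,
        exists_eq_or_imp]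
      simp

theorem mem_pvFired (text : String) (families : List String) (t : String) :
    t ∈ pvFired text families ↔
      (∃ fam ∈ families, t ∈ PySem.Dict.getD pvFamilyTags fam []) ∨
      (∃ pr ∈ PySem.Dict.items pvPatternTags, PySem.Str.isIn pr.1 text = true ∧ t ∈ pr.2) := by
  unfold pvFired
  rw [mem_foldl_if_update, mem_foldl_update]
  simp [PySem.Set.empty]

theorem famKnee (fam : String) :
    ("knee_sensitivity" ∈ PySem.Dict.getD pvFamilyTags fam []) ↔ (False) := by
  by_cases h0 : fam = "arm_balance"
  · subst h0; decide
  by_cases h1 : fam = "inversion"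
  · subst h1; decide
  by_cases h2 : fam = "shoulder_opener"
  · subst h2; decide
  by_cases h3 : fam = "backbend"
  · subst h3; decide
  by_cases h4 : fam = "hip_opener"
  · subst h4; decide
  by_cases h5 : fam = "standing"
  · subst h5; decide
  rw [PySem.Dict.getD_of_not_contains]
  · simp
  · simp [pvFamilyTags, PySem.Dict.contains, Ne.symm h0, Ne.symm h1, Ne.symm h2, Ne.symm h3, Ne.symm h4, Ne.symm h5]

theorem famShoulder (fam : String) :
    ("shoulder_tightness" ∈ PySem.Dict.getD pvFamilyTags fam []) ↔ (fam = "arm_balance" ∨ fam = "inversion" ∨ fam = "shoulder_opener") := by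
  by_cases h0 : fam = "arm_balance"
  · subst h0; decide
  by_cases h1 : fam = "inversion"
  · subst h1; decide
  by_cases h2 : fam = "shoulder_opener"
  · subst h2; decide
  by_cases h3 : fam = "backbend"
  · subst h3; decide
  by_cases h4 : fam = "hip_opener"
  · subst h4; decide
  by_cases h5 : fam = "standing"
  · subst h5; decide
  rw [PySem.Dict.getD_of_not_contains]
  · simp [h0, h1, h2]
  · simp [pvFamilyTags, PySem.Dict.contains, Ne.symm h0, Ne.symm h1, Ne.symm h2, Ne.symm h3, Ne.symm h4, Ne.symm h5]

theorem famBack (fam : String) :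
    ("back_pain" ∈ PySem.Dict.getD pvFamilyTags fam []) ↔ (fam = "backbend" ∨ fam = "inversion") := by
  by_cases h0 : fam = "arm_balance"
  · subst h0; decide
  by_cases h1 : fam = "inversion"
  · subst h1; decide
  by_cases h2 : fam = "shoulder_opener"
  · subst h2; decide
  by_cases h3 : fam = "backbend"
  · subst h3; decide
  by_cases h4 : fam = "hip_opener"
  · subst h4; decide
  by_cases h5 : fam = "standing"
  · subst h5; decide
  rw [PySem.Dict.getD_of_not_contains]
  · simp [h3, h1]
  · simp [pvFamilyTags, PySem.Dict.contains, Ne.symm h0, Ne.symm h1, Ne.symm h2, Ne.symm h3, Ne.symm h4, Ne.symm h5]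

theorem famHip (fam : String) :
    ("hip_tightness" ∈ PySem.Dict.getD pvFamilyTags fam []) ↔ (fam = "hip_opener" ∨ fam = "standing") := by
  by_cases h0 : fam = "arm_balance"
  · subst h0; decide
  by_cases h1 : fam = "inversion"
  · subst h1; decide
  by_cases h2 : fam = "shoulder_opener"
  · subst h2; decide
  by_cases h3 : fam = "backbend"
  · subst h3; decide
  by_cases h4 : fam = "hip_opener"
  · subst h4; decide
  by_cases h5 : fam = "standing"
  · subst h5; decide
  rw [PySem.Dict.getD_of_not_contains]
  · simp [h4, h5]
  · simp [pvFamilyTags, PySem.Dict.contains, Ne.symm h0, Ne.symm h1, Ne.symm h2, Ne.symm h3, Ne.symm h4, Ne.symm h5]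

theorem containsKnee (text : String) (families : List String) :
    PySem.Set.contains (pvFired text families) "knee_sensitivity" = pvContains text ["chair pose", "warrior", "low lunge", "garland pose", "noose pose", "eagle pose", "tree pose", "half moon", "split pose", "virasana", "vajrasana", "camel pose", "frog pose", "pigeon pose", "bound angle", "child pose"] := by
  rw [Bool.eq_iff_iff]
  simp only [PySem.Set.contains, List.contains_iff_mem, mem_pvFired, famKnee]
  simp [pvPatternTags, pvContains]

theorem containsShoulder (text : String) (families : List String) :
    PySem.Set.contains (pvFired text families) "shoulder_tightness" = ((["arm_balance", "inversion", "shoulder_opener"].any (fun f => families.contains f)) || pvContains text ["plank pose", "cobra pose", "wheel pose", "bow pose", "camel pose"]) := by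
  rw [Bool.eq_iff_iff]
  simp only [PySem.Set.contains, List.contains_iff_mem, mem_pvFired, famShoulder]
  simp [pvPatternTags, pvContains, and_or_left, exists_or]
  tauto

theorem containsBack (text : String) (families : List String) :
    PySem.Set.contains (pvFired text families) "back_pain" = ((["backbend", "inversion"].any (fun f => families.contains f)) || pvContains text ["forward bend", "split pose", "plow pose", "shoulderstand"]) := by
  rw [Bool.eq_iff_iff]
  simp only [PySem.Set.contains, List.contains_iff_mem, mem_pvFired, famBack]
  simp [pvPatternTags, pvContains, and_or_left, exists_or]
  tauto

theorem containsHip (text : String) (families : List String) :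
    PySem.Set.contains (pvFired text families) "hip_tightness" = ((["hip_opener", "standing"].any (fun f => families.contains f)) || pvContains text ["warrior", "low lunge", "pigeon pose", "frog pose", "split pose"]) := by
  rw [Bool.eq_iff_iff]
  simp only [PySem.Set.contains, List.contains_iff_mem, mem_pvFired, famHip]
  simp [pvPatternTags, pvContains, and_or_left, exists_or]
  tauto

-- ===== VERDICT (by name: the statement is the Claim_ definition above) =====
theorem caution_tags_for_pose_py_spec : Claim_equal_caution_tags_for_pose_py := by
  unfold Claim_equal_caution_tags_for_pose_py
  intro text families _
  unfold Spec_caution_tags_for_pose_py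
  rw [alt_eq]
  simp only [pvTagOrder, List.filter_cons, List.filter_nil, containsKnee, containsShoulder, containsBack, containsHip]
  unfold caution_tags_for_pose_py
  split_ifs <;> rfl
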